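-- pv_equiv track=rewrite | github.com/sayashm/Programming2024-2025 | Reeks_05/tikcode.py | encode_letter
-- ===== SOURCE A (Python) =====
-- def encode_letter(L):
--     '''
--     >>> encode_letter('V')
--     (5, 1)
--     >>> encode_letter('i')
--     (2, 4)
--     '''
--
--     alphabets = list(map(chr, range(97, 123)))
--     alphabets.remove('k')
--     dv_alphabets = [alphabets[i:i + 5] for i in range(0, 25, 5)]
--
--     L = str(L).lower()
--
--     if L=='k':
--         L = 'c'
--     for i in range(5):
--         if L in dv_alphabets[i]:
--            return (i+1 , dv_alphabets[i].index(L)+1)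
-- ===== SOURCE B (Python) =====
-- def encode_letter(L):
--     # arithmetic grid position instead of building and scanning the 5x5 table
--     L = str(L).lower()
--     if L == 'k':
--         L = 'c'
--     if len(L) == 1 and 'a' <= L <= 'z':
--         idx = ord(L) - 97
--         if L > 'k':
--             idx -= 1
--         return (idx // 5 + 1, idx % 5 + 1)
-- ===== Notes on version B (the rewrite author's own statement) =====
-- stated objective: simpler
-- what changed: B computes the Polybius-style (row,col) arithmetically from ord(L)-97 (skipping the removed 'k') instead of building the 5x5 letter table and scanning its rows with membership tests and list.index.
import Mathlib
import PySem

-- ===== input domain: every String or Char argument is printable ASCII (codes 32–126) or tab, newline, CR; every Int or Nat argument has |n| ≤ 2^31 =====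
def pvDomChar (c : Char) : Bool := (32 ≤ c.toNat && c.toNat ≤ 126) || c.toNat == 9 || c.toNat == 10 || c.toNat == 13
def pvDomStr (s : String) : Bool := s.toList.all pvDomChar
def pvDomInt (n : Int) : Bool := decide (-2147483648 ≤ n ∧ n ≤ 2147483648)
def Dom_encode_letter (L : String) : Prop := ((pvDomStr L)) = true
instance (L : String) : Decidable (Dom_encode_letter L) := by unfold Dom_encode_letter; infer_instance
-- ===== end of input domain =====

-- B replaces A's table construction and scan by direct ord-arithmetic on the letter (simpler).

-- ===== PORT A =====
-- the 'for i in range(5): if L in dv_alphabets[i]: return …' loop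
def encAloop (L : String) (dv : List (List String)) : List Int → Option (Int × Int)
  | [] => none
  | i :: rest =>
    let row := PySem.List.pyGetD dv i []
    if L ∈ row then some (i + 1, ((PySem.List.index? row L).getD 0 : Int) + 1)
    else encAloop L dv rest

def encode_letter (L : String) : Option (Int × Int) :=
  let alphabets := (PySem.List.pyRange 97 123 1).map (fun n => String.ofList [Char.ofNat n.toNat])
  let alphabets := (PySem.List.remove? alphabets "k").getD alphabets  -- 'k' is present, remove never raises
  let dv := (PySem.List.pyRange 0 25 5).map (fun i => PySem.List.slice alphabets (some i) (some (i + 5)))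
  let L := PySem.Str.lower L
  let L := if L == "k" then "c" else L
  encAloop L dv (PySem.List.pyRange 0 5 1)

-- ===== PORT B =====
-- 'a' <= L <= 'z' and L > 'k' are Python str comparisons = code-point lex order = PySem.Chars.strLt (exact);
-- ord(L) on the already-checked single-character string is the head character's code point (exact).
def encode_letter_alt (L : String) : Option (Int × Int) :=
  let L := PySem.Str.lower L
  let L := if L == "k" then "c" else L
  if PySem.Str.len L = 1 ∧ PySem.Chars.strLt L.toList ['a'] = false ∧ PySem.Chars.strLt ['z'] L.toList = false then
    let idx : Int := ((L.toList.headD 'a').toNat : Int) - 97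
    let idx := if PySem.Chars.strLt ['k'] L.toList then idx - 1 else idx
    some (PySem.Int.floordiv idx 5 + 1, PySem.Int.mod idx 5 + 1)
  else none

-- ===== PRECONDITION & SPEC =====
def Spec_encode_letter (L : String) (out : Option (Int × Int)) : Prop := out = encode_letter_alt L
instance (L : String) (out : Option (Int × Int)) : Decidable (Spec_encode_letter L out) := by unfold Spec_encode_letter; infer_instance

-- ===== CLAIM (what is proved, stated in full; the proofs are below) =====
def Claim_equal_encode_letter : Prop := ∀ (L : String), Dom_encode_letter L → Spec_encode_letter L (encode_letter L)

-- ===== LEMMAS AND PROOFS =====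

-- the two ports after the shared lower/'k'-replacement prefix, as functions of the resulting string
def aCore (t : String) : Option (Int × Int) :=
  encAloop t ((PySem.List.pyRange 0 25 5).map (fun i =>
    PySem.List.slice (((PySem.List.remove? ((PySem.List.pyRange 97 123 1).map
      (fun n => String.ofList [Char.ofNat n.toNat])) "k")).getD
        ((PySem.List.pyRange 97 123 1).map (fun n => String.ofList [Char.ofNat n.toNat])))
      (some i) (some (i + 5)))) (PySem.List.pyRange 0 5 1)

def bCore (t : String) : Option (Int × Int) :=
  if PySem.Str.len t = 1 ∧ PySem.Chars.strLt t.toList ['a'] = false ∧ PySem.Chars.strLt ['z'] t.toList = false then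
    let idx : Int := ((t.toList.headD 'a').toNat : Int) - 97
    let idx := if PySem.Chars.strLt ['k'] t.toList then idx - 1 else idx
    some (PySem.Int.floordiv idx 5 + 1, PySem.Int.mod idx 5 + 1)
  else none

lemma unfoldA (L : String) :
    encode_letter L = aCore (if PySem.Str.lower L == "k" then "c" else PySem.Str.lower L) := rfl

lemma unfoldB (L : String) :
    encode_letter_alt L = bCore (if PySem.Str.lower L == "k" then "c" else PySem.Str.lower L) := rfl

-- every character of lower(L) stays in the printable-ASCII domain
lemma dom_lowerChar (c : Char) (h : pvDomChar c = true) : pvDomChar (PySem.Chars.lowerChar c) = true := by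
  simp only [PySem.Chars.lowerChar, PySem.Chars.isupper]
  split_ifs with h1
  · simp only [Bool.and_eq_true, decide_eq_true_eq, Char.le_def] at h1
    have h65 : 65 ≤ c.toNat := h1.1
    have h90 : c.toNat ≤ 90 := h1.2
    have hv : (c.toNat + 32).isValidChar := Or.inl (by omega)
    simp only [pvDomChar, Char.toNat_ofNat, if_pos hv]
    simp only [Bool.or_eq_true, Bool.and_eq_true, decide_eq_true_eq] at *
    omega
  · exact h

-- single (post-prefix) characters: decided by enumeration over the ASCII range
set_option maxRecDepth 20000 in
lemma core_single (n : Nat) (hn : n < 127) (hk : n ≠ 107) :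
    aCore (String.ofList [Char.ofNat n]) = bCore (String.ofList [Char.ofNat n]) := by
  revert hk
  revert n
  decide

lemma not_mem_row (t : String) (h : t.toList.length ≠ 1) (row : List String)
    (hrow : ∀ s ∈ row, s.toList.length = 1) : t ∉ row := fun hm => h (hrow t hm)

-- strings of length ≠ 1 are found in no row and rejected by B's length test
lemma core_ne_one (t : String) (h : t.toList.length ≠ 1) : aCore t = bCore t := by
  have ha : aCore t = encAloop t
      [["a","b","c","d","e"],["f","g","h","i","j"],["l","m","n","o","p"],
       ["q","r","s","t","u"],["v","w","x","y","z"]] [0,1,2,3,4] := rfl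
  have hrows : aCore t = none := by
    rw [ha]
    simp only [encAloop]
    rw [if_neg (not_mem_row t h _ (by decide)), if_neg (not_mem_row t h _ (by decide)),
      if_neg (not_mem_row t h _ (by decide)), if_neg (not_mem_row t h _ (by decide)),
      if_neg (not_mem_row t h _ (by decide))]
  rw [hrows, bCore]
  rw [if_neg]
  intro hcond
  apply h
  have := hcond.1
  simpa [PySem.Str.len_eq] using this

theorem encode_letter_spec_aux (L : String) (hdom : Dom_encode_letter L) :
    encode_letter L = encode_letter_alt L := by
  rw [unfoldA, unfoldB]
  by_cases hk : PySem.Str.lower L == "k"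
  · rw [if_pos hk]
    decide
  · rw [if_neg hk]
    rcases hcl : (PySem.Str.lower L).toList with _ | ⟨c, cs⟩
    · apply core_ne_one
      rw [hcl]
      simp
    · rcases cs with _ | ⟨c2, cs2⟩
      · have hts : PySem.Str.lower L = String.ofList [c] := by
          rw [String.ext_iff]
          simp [hcl]
        have hdc : pvDomChar c = true := by
          have h1 : (PySem.Str.lower L).toList = PySem.Chars.lower L.toList := PySem.Str.toList_lower L
          rw [hcl] at h1
          have hc : c ∈ PySem.Chars.lower L.toList := by rw [← h1]; simp
          simp only [PySem.Chars.lower, List.mem_map] at hc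
          obtain ⟨c0, hc0, rfl⟩ := hc
          apply dom_lowerChar
          simp only [Dom_encode_letter, pvDomStr, List.all_eq_true] at hdom
          exact hdom c0 hc0
        have hn : c.toNat < 127 := by
          simp only [pvDomChar, Bool.or_eq_true, Bool.and_eq_true, decide_eq_true_eq, beq_iff_eq] at hdc
          omega
        have hk107 : c.toNat ≠ 107 := by
          intro h107
          apply hk
          have hc107 : c = Char.ofNat 107 := by rw [← h107, Char.ofNat_toNat]
          rw [hts, hc107]
          decide
        rw [hts]
        rw [show c = Char.ofNat c.toNat from (Char.ofNat_toNat c).symm]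
        exact core_single c.toNat hn hk107
      · apply core_ne_one
        rw [hcl]
        simp

-- ===== VERDICT (by name: the statement is the Claim_ definition above) =====
theorem encode_letter_spec : Claim_equal_encode_letter := by
  intro L h
  exact encode_letter_spec_aux L h
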